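-- pv_equiv track=rewrite | github.com/Calmsea10/ATCSIndProj | bitboard_checkers.py | update_kings
-- ===== SOURCE A (Python) =====
-- def update_kings(board_white,board_red,kings_white,kings_red):
--     for i in range(0,4):
--         if (board_white>>i)&1:
--             kings_white=kings_white|(1<<i)
--             board_white=board_white&~(1<<i)
--     for j in range(28,32):
--         if (board_red>>j)&1:
--             kings_red=kings_red|(1<<j)
--             board_red=board_red&~(1<<j)
--     return (board_white,board_red,kings_white,kings_red)
-- ===== SOURCE B (Python) =====
-- def update_kings(board_white, board_red, kings_white, kings_red):
--     mask_w = board_white & 0xF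
--     mask_r = board_red & 0xF0000000
--     return (board_white & ~0xF,
--             board_red & ~0xF0000000,
--             kings_white | mask_w,
--             kings_red | mask_r)
-- ===== Notes on version B (the rewrite author's own statement) =====
-- stated objective: idiomatic
-- what changed: Replaces both per-bit loops (test bit, set king bit, clear board bit) with whole-region bulk bitmask operations: mask the four promotion bits at once, OR them into kings, AND them out of the board.
import Mathlib
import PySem

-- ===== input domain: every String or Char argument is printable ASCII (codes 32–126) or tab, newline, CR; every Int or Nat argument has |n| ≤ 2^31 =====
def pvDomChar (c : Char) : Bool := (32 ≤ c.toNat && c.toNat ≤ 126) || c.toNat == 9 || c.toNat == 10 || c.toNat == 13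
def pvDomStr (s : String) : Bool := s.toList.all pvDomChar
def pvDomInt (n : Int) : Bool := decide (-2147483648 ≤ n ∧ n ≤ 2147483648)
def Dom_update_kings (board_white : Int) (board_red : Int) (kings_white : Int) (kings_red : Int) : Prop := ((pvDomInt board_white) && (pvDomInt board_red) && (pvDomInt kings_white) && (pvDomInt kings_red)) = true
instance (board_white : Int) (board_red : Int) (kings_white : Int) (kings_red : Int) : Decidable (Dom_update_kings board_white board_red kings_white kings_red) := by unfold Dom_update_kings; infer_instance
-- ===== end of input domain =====

-- B replaces A's two per-bit promotion loops with bulk bitmask operations on the whole back-row region (idiomatic; same O(1) cost).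
-- ===== PORT A =====
-- A clears/promotes the four back-row bits one bit at a time; literal port of the two loops.
def update_kings (board_white : Int) (board_red : Int) (kings_white : Int) (kings_red : Int) : Int × Int × Int × Int :=
  let sw : Int × Int := (PySem.List.pyRange 0 4 1).foldl
    (fun (st : Int × Int) (i : Int) =>
      if PySem.Int.band (st.1 >>> i) 1 ≠ 0 then
        (PySem.Int.band st.1 (Int.not ((1:Int) <<< i)), PySem.Int.bor st.2 ((1:Int) <<< i))
      else st)
    (board_white, kings_white)
  let sr : Int × Int := (PySem.List.pyRange 28 32 1).foldl
    (fun (st : Int × Int) (j : Int) =>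
      if PySem.Int.band (st.1 >>> j) 1 ≠ 0 then
        (PySem.Int.band st.1 (Int.not ((1:Int) <<< j)), PySem.Int.bor st.2 ((1:Int) <<< j))
      else st)
    (board_red, kings_red)
  (sw.1, sr.1, sw.2, sr.2)

-- ===== PORT B =====
-- B masks the whole promotion region at once: one AND to extract, one OR into kings, one AND-NOT to clear.
def update_kings_alt (board_white : Int) (board_red : Int) (kings_white : Int) (kings_red : Int) : Int × Int × Int × Int :=
  let mask_w : Int := PySem.Int.band board_white 15
  let mask_r : Int := PySem.Int.band board_red 4026531840
  (PySem.Int.band board_white (Int.not 15),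
   PySem.Int.band board_red (Int.not 4026531840),
   PySem.Int.bor kings_white mask_w,
   PySem.Int.bor kings_red mask_r)

-- ===== PRECONDITION & SPEC =====
def Spec_update_kings (board_white : Int) (board_red : Int) (kings_white : Int) (kings_red : Int) (out : Int × Int × Int × Int) : Prop := out = update_kings_alt board_white board_red kings_white kings_red
instance (board_white : Int) (board_red : Int) (kings_white : Int) (kings_red : Int) (out : Int × Int × Int × Int) : Decidable (Spec_update_kings board_white board_red kings_white kings_red out) := by unfold Spec_update_kings; infer_instance

-- ===== CLAIM (what is proved, stated in full; the proofs are below) =====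
def Claim_equal_update_kings : Prop := ∀ (board_white : Int) (board_red : Int) (kings_white : Int) (kings_red : Int), Dom_update_kings board_white board_red kings_white kings_red → Spec_update_kings board_white board_red kings_white kings_red (update_kings board_white board_red kings_white kings_red)

-- ===== LEMMAS AND PROOFS =====

theorem pv_xor_submask : ∀ (n b : Nat), b &&& n = b → n ^^^ b = n - b := by
  intro n
  induction n using Nat.binaryRec with
  | zero => intro b hb; simp [Nat.and_zero] at hb; simp [hb]
  | bit a n ih =>
      intro b hb
      induction b using Nat.binaryRec with
      | zero => simp
      | bit b0 b' _ =>
          rw [Nat.land_bit] at hb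
          have h1 : (b0 && a) = b0 ∧ b' &&& n = b' := by
            constructor
            · have := congrArg (fun x => x % 2) hb
              simp [Nat.bit_val] at this
              cases b0 <;> cases a <;> simp_all
            · have := congrArg (fun x => x / 2) hb
              simp [Nat.bit_val] at this
              cases b0 <;> cases a <;> simp_all; omega
          have hle : b' ≤ n := le_trans (le_of_eq h1.2.symm) Nat.and_le_right
          rw [Nat.xor_bit, ih b' h1.2, Nat.bit_val, Nat.bit_val]
          rcases h1.1 with h
          cases a <;> cases b0 <;> simp_all <;> omega

theorem pv_sub_and_ldiff (n m : Nat) : n - (n &&& m) = Nat.ldiff n m := by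
  have hsub : (n &&& m) &&& n = n &&& m := by
    rw [Nat.and_right_comm, Nat.and_self]
  rw [← pv_xor_submask n (n &&& m) hsub]
  apply Nat.eq_of_testBit_eq
  intro j
  rw [Nat.testBit_xor, Nat.testBit_and, Nat.testBit_ldiff]
  cases n.testBit j <;> cases m.testBit j <;> rfl

theorem pv_tb_not (x : Int) (j : Nat) : (Int.not x).testBit j = !x.testBit j := by
  cases x <;> simp [Int.not, Int.testBit]
theorem pv_tb_shr (x : Int) (i k : Nat) : (x >>> ((i : Nat) : Int)).testBit k = x.testBit (i + k) := by
  cases x with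
  | ofNat m =>
      rw [show Int.ofNat m = ((m:Nat):Int) from rfl, Int.shiftRight_natCast m i]
      simp [Int.testBit, Nat.testBit_shiftRight]
  | negSucc m =>
      rw [Int.shiftRight_negSucc]
      simp [Int.testBit, Nat.testBit_shiftRight]
theorem pv_tb_pow (k j : Nat) : (((2 ^ k : Nat) : Int)).testBit j = decide (k = j) := by
  simp [Int.testBit, Nat.testBit_two_pow]
theorem pv_eq_of_testBit_eq (a b : Int) (h : ∀ j : Nat, a.testBit j = b.testBit j) : a = b := by
  have key : ∀ m n : Nat, (∀ j, Nat.testBit m j = !Nat.testBit n j) → False := by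
    intro m n hmn
    have h1 : Nat.testBit m (m + n) = false :=
      Nat.testBit_eq_false_of_lt (lt_of_le_of_lt (Nat.le_add_right m n)
        (lt_of_lt_of_le Nat.lt_two_pow_self (Nat.pow_le_pow_right (by omega) (le_refl _))))
    have h2 : Nat.testBit n (m + n) = false :=
      Nat.testBit_eq_false_of_lt (lt_of_le_of_lt (Nat.le_add_left n m)
        (lt_of_lt_of_le Nat.lt_two_pow_self (Nat.pow_le_pow_right (by omega) (le_refl _))))
    have := hmn (m + n); rw [h1, h2] at this; simp at this
  cases a with
  | ofNat m =>
    cases b with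
    | ofNat n =>
        have := Nat.eq_of_testBit_eq (x := m) (y := n) (by intro j; simpa [Int.testBit] using h j)
        simp [this]
    | negSucc n => exact absurd h (by intro hh; exact key m n (by intro j; simpa [Int.testBit] using hh j))
  | negSucc m =>
    cases b with
    | ofNat n => exact absurd h (by intro hh; exact key n m (by intro j; have := hh j; simp [Int.testBit] at this; simp [this]))
    | negSucc n =>
        have := Nat.eq_of_testBit_eq (x := m) (y := n) (by
          intro j; have := h j; simp [Int.testBit] at this; simpa using this)
        simp [this]

theorem pv_band_eq_land (a b : Int) : PySem.Int.band a b = Int.land a b := by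
  cases a with
  | ofNat m =>
    cases b with
    | ofNat n =>
        simp [PySem.Int.band, Int.land]
    | negSucc n =>
        have h1 : ¬ (0:Int) ≤ Int.negSucc n := by omega
        have h2 : (-(Int.negSucc n) - 1).toNat = n := by omega
        simp [PySem.Int.band, Int.land, h1, pv_sub_and_ldiff]
  | negSucc m =>
    have h1 : ¬ (0:Int) ≤ Int.negSucc m := by omega
    have h2 : (-(Int.negSucc m) - 1).toNat = m := by omega
    cases b with
    | ofNat n =>
        simp [PySem.Int.band, Int.land, h1, pv_sub_and_ldiff]
    | negSucc n =>
        have h3 : ¬ (0:Int) ≤ Int.negSucc n := by omega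
        have h4 : (-(Int.negSucc n) - 1).toNat = n := by omega
        simp [PySem.Int.band, Int.land, Int.negSucc_eq]
        omega

theorem pv_bor_eq_lor (a b : Int) : PySem.Int.bor a b = Int.lor a b := by
  cases a with
  | ofNat m =>
    cases b with
    | ofNat n =>
        simp [PySem.Int.bor, Int.lor]
    | negSucc n =>
        have h1 : ¬ (0:Int) ≤ Int.negSucc n := by omega
        have h2 : (-(Int.negSucc n) - 1).toNat = n := by omega
        simp [PySem.Int.bor, Int.lor, pv_sub_and_ldiff, Int.negSucc_eq]
        omega
  | negSucc m =>
    have h1 : ¬ (0:Int) ≤ Int.negSucc m := by omega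
    have h2 : (-(Int.negSucc m) - 1).toNat = m := by omega
    cases b with
    | ofNat n =>
        simp [PySem.Int.bor, Int.lor, pv_sub_and_ldiff, Int.negSucc_eq]
        omega
    | negSucc n =>
        have h3 : ¬ (0:Int) ≤ Int.negSucc n := by omega
        have h4 : (-(Int.negSucc n) - 1).toNat = n := by omega
        simp [PySem.Int.bor, Int.lor, Int.negSucc_eq]
        omega

theorem pv_band_one (x : Int) : PySem.Int.band x 1 = if x.testBit 0 then 1 else 0 := by
  rw [pv_band_eq_land]
  apply pv_eq_of_testBit_eq
  intro j
  rw [Int.testBit_land]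
  have tb1 : ∀ j, (1:Int).testBit j = decide (0 = j) := fun j => by
    rw [show (1:Int) = ((2^0 : Nat) : Int) by norm_num]; exact pv_tb_pow 0 j
  have tb0 : ∀ j, (0:Int).testBit j = false := fun j => by
    simp [Int.testBit]
  by_cases h : x.testBit 0
  · rw [if_pos h, tb1]
    cases j with
    | zero => simp [h]
    | succ k => simp
  · rw [if_neg h, tb1, tb0]
    cases j with
    | zero => simp_all
    | succ k => simp

theorem pv_cond (x : Int) (i : Nat) : (PySem.Int.band (x >>> ((i : Nat) : Int)) 1 ≠ 0) ↔ x.testBit i = true := by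
  rw [pv_band_one, pv_tb_shr]
  by_cases h : x.testBit (i + 0) <;> simp_all

theorem pv_tb_one_shl (i j : Nat) : ((1:Int) <<< ((i : Nat) : Int)).testBit j = decide (i = j) := by
  rw [show (1:Int) <<< ((i:Nat):Int) = ((2^i : Nat) : Int) by
    rw [show (1:Int) = ((1:Nat):Int) from rfl, Int.shiftLeft_natCast]
    norm_num [Nat.shiftLeft_eq]]
  exact pv_tb_pow i j

theorem pv_step (bw kw : Int) (i : Nat) :
    (if PySem.Int.band (bw >>> ((i : Nat) : Int)) 1 ≠ 0 then
        (PySem.Int.band bw (Int.not ((1:Int) <<< ((i : Nat) : Int))), PySem.Int.bor kw ((1:Int) <<< ((i : Nat) : Int)))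
      else (bw, kw))
    = (PySem.Int.band bw (Int.not ((1:Int) <<< ((i : Nat) : Int))),
       PySem.Int.bor kw (PySem.Int.band bw ((1:Int) <<< ((i : Nat) : Int)))) := by
  by_cases h : bw.testBit i
  · rw [if_pos ((pv_cond bw i).mpr h)]
    have hb : PySem.Int.band bw ((1:Int) <<< ((i : Nat) : Int)) = (1:Int) <<< ((i : Nat) : Int) := by
      apply pv_eq_of_testBit_eq
      intro j
      rw [pv_band_eq_land, Int.testBit_land, pv_tb_one_shl]
      by_cases hj : i = j
      · subst hj; simp [h]
      · simp [hj]
    rw [hb]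
  · rw [if_neg (by simpa [pv_cond bw i] using h)]
    have hclear : PySem.Int.band bw (Int.not ((1:Int) <<< ((i : Nat) : Int))) = bw := by
      apply pv_eq_of_testBit_eq
      intro j
      rw [pv_band_eq_land, Int.testBit_land, pv_tb_not, pv_tb_one_shl]
      by_cases hj : i = j
      · subst hj; simp [h]
      · simp [hj]
    have hz : PySem.Int.band bw ((1:Int) <<< ((i : Nat) : Int)) = 0 := by
      apply pv_eq_of_testBit_eq
      intro j
      rw [pv_band_eq_land, Int.testBit_land, pv_tb_one_shl]
      by_cases hj : i = j
      · subst hj; simp [Int.testBit]; simpa using h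
      · simp [hj, Int.testBit]
    have hor : PySem.Int.bor kw (0:Int) = kw := by
      rw [pv_bor_eq_lor]
      apply pv_eq_of_testBit_eq
      intro j
      rw [Int.testBit_lor]
      simp [Int.testBit]
    rw [hclear, hz, hor]

theorem pv_tb_natCast (m : Nat) (j : Nat) : ((m : Nat) : Int).testBit j = m.testBit j := rfl

theorem pv_tb_15 (j : Nat) : (15 : Int).testBit j = decide (j < 4) := by
  rw [show (15:Int) = ((2^4 - 1 : Nat) : Int) by norm_num, pv_tb_natCast,
    Nat.testBit_two_pow_sub_one]

theorem pv_tb_maskr (j : Nat) : (4026531840 : Int).testBit j = (decide (j ≥ 28) && decide (j - 28 < 4)) := by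
  rw [show (4026531840:Int) = ((15 <<< 28 : Nat) : Int) by norm_num [Nat.shiftLeft_eq], pv_tb_natCast,
    Nat.testBit_shiftLeft, show (15:Nat) = 2^4 - 1 by norm_num, Nat.testBit_two_pow_sub_one]

theorem pv_tb_shl_0 (j : Nat) : ((1:Int) <<< (0:Int)).testBit j = decide (0 = j) := by
  rw [show (0:Int) = ((0:Nat):Int) by norm_num]; exact pv_tb_one_shl 0 j
theorem pv_tb_shl_1 (j : Nat) : ((1:Int) <<< (1:Int)).testBit j = decide (1 = j) := by
  rw [show (1:Int) = ((1:Nat):Int) by norm_num]; exact pv_tb_one_shl 1 j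
theorem pv_tb_shl_2 (j : Nat) : ((1:Int) <<< (2:Int)).testBit j = decide (2 = j) := by
  rw [show (2:Int) = ((2:Nat):Int) by norm_num]; exact pv_tb_one_shl 2 j
theorem pv_tb_shl_3 (j : Nat) : ((1:Int) <<< (3:Int)).testBit j = decide (3 = j) := by
  rw [show (3:Int) = ((3:Nat):Int) by norm_num]; exact pv_tb_one_shl 3 j
theorem pv_tb_shl_28 (j : Nat) : ((1:Int) <<< (28:Int)).testBit j = decide (28 = j) := by
  rw [show (28:Int) = ((28:Nat):Int) by norm_num]; exact pv_tb_one_shl 28 j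
theorem pv_tb_shl_29 (j : Nat) : ((1:Int) <<< (29:Int)).testBit j = decide (29 = j) := by
  rw [show (29:Int) = ((29:Nat):Int) by norm_num]; exact pv_tb_one_shl 29 j
theorem pv_tb_shl_30 (j : Nat) : ((1:Int) <<< (30:Int)).testBit j = decide (30 = j) := by
  rw [show (30:Int) = ((30:Nat):Int) by norm_num]; exact pv_tb_one_shl 30 j
theorem pv_tb_shl_31 (j : Nat) : ((1:Int) <<< (31:Int)).testBit j = decide (31 = j) := by
  rw [show (31:Int) = ((31:Nat):Int) by norm_num]; exact pv_tb_one_shl 31 j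

-- ===== VERDICT (by name: the statement is the Claim_ definition above) =====
theorem update_kings_spec : Claim_equal_update_kings := by
  intro bw br kw kr _
  unfold Spec_update_kings update_kings update_kings_alt
  rw [show PySem.List.pyRange 0 4 1 = [0, 1, 2, 3] from by decide,
     show PySem.List.pyRange 28 32 1 = [28, 29, 30, 31] from by decide]
  simp only [List.foldl_cons, List.foldl_nil]
  have e0 := pv_step bw kw 0
  simp only [Nat.cast_zero] at e0
  rw [e0]
  simp only []
  have e1 := pv_step (PySem.Int.band bw (Int.not ((1:Int) <<< (0:Int)))) (PySem.Int.bor kw (PySem.Int.band bw ((1:Int) <<< (0:Int)))) 1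
  simp only [Nat.cast_one] at e1
  rw [e1]
  simp only []
  have e2 := pv_step (PySem.Int.band (PySem.Int.band bw (Int.not ((1:Int) <<< (0:Int)))) (Int.not ((1:Int) <<< (1:Int)))) (PySem.Int.bor (PySem.Int.bor kw (PySem.Int.band bw ((1:Int) <<< (0:Int)))) (PySem.Int.band (PySem.Int.band bw (Int.not ((1:Int) <<< (0:Int)))) ((1:Int) <<< (1:Int)))) 2
  simp only [Nat.cast_ofNat] at e2
  rw [e2]
  simp only []
  have e3 := pv_step (PySem.Int.band (PySem.Int.band (PySem.Int.band bw (Int.not ((1:Int) <<< (0:Int)))) (Int.not ((1:Int) <<< (1:Int)))) (Int.not ((1:Int) <<< (2:Int)))) (PySem.Int.bor (PySem.Int.bor (PySem.Int.bor kw (PySem.Int.band bw ((1:Int) <<< (0:Int)))) (PySem.Int.band (PySem.Int.band bw (Int.not ((1:Int) <<< (0:Int)))) ((1:Int) <<< (1:Int)))) (PySem.Int.band (PySem.Int.band (PySem.Int.band bw (Int.not ((1:Int) <<< (0:Int)))) (Int.not ((1:Int) <<< (1:Int)))) ((1:Int) <<< (2:Int)))) 3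
  simp only [Nat.cast_ofNat] at e3
  rw [e3]
  simp only []
  have e28 := pv_step br kr 28
  simp only [Nat.cast_ofNat] at e28
  rw [e28]
  simp only []
  have e29 := pv_step (PySem.Int.band br (Int.not ((1:Int) <<< (28:Int)))) (PySem.Int.bor kr (PySem.Int.band br ((1:Int) <<< (28:Int)))) 29
  simp only [Nat.cast_ofNat] at e29
  rw [e29]
  simp only []
  have e30 := pv_step (PySem.Int.band (PySem.Int.band br (Int.not ((1:Int) <<< (28:Int)))) (Int.not ((1:Int) <<< (29:Int)))) (PySem.Int.bor (PySem.Int.bor kr (PySem.Int.band br ((1:Int) <<< (28:Int)))) (PySem.Int.band (PySem.Int.band br (Int.not ((1:Int) <<< (28:Int)))) ((1:Int) <<< (29:Int)))) 30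
  simp only [Nat.cast_ofNat] at e30
  rw [e30]
  simp only []
  have e31 := pv_step (PySem.Int.band (PySem.Int.band (PySem.Int.band br (Int.not ((1:Int) <<< (28:Int)))) (Int.not ((1:Int) <<< (29:Int)))) (Int.not ((1:Int) <<< (30:Int)))) (PySem.Int.bor (PySem.Int.bor (PySem.Int.bor kr (PySem.Int.band br ((1:Int) <<< (28:Int)))) (PySem.Int.band (PySem.Int.band br (Int.not ((1:Int) <<< (28:Int)))) ((1:Int) <<< (29:Int)))) (PySem.Int.band (PySem.Int.band (PySem.Int.band br (Int.not ((1:Int) <<< (28:Int)))) (Int.not ((1:Int) <<< (29:Int)))) ((1:Int) <<< (30:Int)))) 31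
  simp only [Nat.cast_ofNat] at e31
  rw [e31]
  simp only []
  simp only [Prod.mk.injEq]
  refine ⟨?_, ?_, ?_, ?_⟩ <;>
  · apply pv_eq_of_testBit_eq
    intro j
    simp only [pv_band_eq_land, pv_bor_eq_lor, Int.testBit_land, Int.testBit_lor, pv_tb_not,
      pv_tb_15, pv_tb_maskr, pv_tb_shl_0, pv_tb_shl_1, pv_tb_shl_2, pv_tb_shl_3, pv_tb_shl_28, pv_tb_shl_29, pv_tb_shl_30, pv_tb_shl_31]
    by_cases hlt : j < 32
    · interval_cases j <;> simp
    · simp [show ¬(0 = j) by omega, show ¬(1 = j) by omega, show ¬(2 = j) by omega,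
        show ¬(3 = j) by omega, show ¬(28 = j) by omega, show ¬(29 = j) by omega,
        show ¬(30 = j) by omega, show ¬(31 = j) by omega, show ¬(j < 4) by omega,
        show ¬(j - 28 < 4) by omega]
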